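-- pv_equiv track=rewrite | github.com/Justin-Akridge/pivottmp | extract_lowest_midspans.py | find_pole_edges
-- ===== SOURCE A (Python) =====
-- def find_pole_edges(groups):
--     min_max = []
--     for group in groups:
--         if group:
--             x_coords = [point[0] for point in group]
--             y_coords = [point[1] for point in group]
--
--             x_min = min(x_coords)
--             x_max = max(x_coords)
--             y_min = min(y_coords)
--             y_max = max(y_coords)
--             min_max.append({
--                 "x_min": x_min,
--                 "x_max": x_max,
--                 "y_min": y_min,
--                 "y_max": y_max
--             })
--     return min_max
-- ===== SOURCE B (Python) =====
-- def find_pole_edges(groups):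
--     min_max = []
--     for group in groups:
--         if not group:
--             continue
--         x0, y0 = group[0]
--         x_min = x_max = x0
--         y_min = y_max = y0
--         for x, y in group[1:]:
--             if x < x_min:
--                 x_min = x
--             if x > x_max:
--                 x_max = x
--             if y < y_min:
--                 y_min = y
--             if y > y_max:
--                 y_max = y
--         min_max.append({"x_min": x_min, "x_max": x_max,
--                         "y_min": y_min, "y_max": y_max})
--     return min_max
-- ===== Notes on version B (the rewrite author's own statement) =====
-- stated objective: alternative
-- what changed: Replaces the two coordinate-list comprehensions plus four separate min/max scans per group with a single pass per group maintaining four bound accumulators (no intermediate lists).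
import Mathlib
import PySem

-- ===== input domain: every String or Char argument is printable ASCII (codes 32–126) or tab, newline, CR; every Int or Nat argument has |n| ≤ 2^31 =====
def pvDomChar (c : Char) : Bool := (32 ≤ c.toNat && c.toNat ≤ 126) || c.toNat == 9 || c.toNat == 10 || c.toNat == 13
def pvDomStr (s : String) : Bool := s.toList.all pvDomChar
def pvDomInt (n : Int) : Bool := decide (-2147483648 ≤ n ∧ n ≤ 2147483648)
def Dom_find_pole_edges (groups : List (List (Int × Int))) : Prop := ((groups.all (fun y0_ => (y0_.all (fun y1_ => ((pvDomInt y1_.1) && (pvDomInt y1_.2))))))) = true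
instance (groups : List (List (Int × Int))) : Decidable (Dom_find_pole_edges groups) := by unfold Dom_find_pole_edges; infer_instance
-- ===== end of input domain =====

-- B replaces A's two coordinate-list comprehensions plus four min/max scans per group
-- with a single pass per group maintaining four bound accumulators (alternative decomposition).


-- ===== PORT A =====
-- A: per nonempty group, build coordinate lists and take min/max of each
-- (Python's min(xs)/max(xs) on a nonempty list is the running fold, exact per
-- PySem.List.min?_id_cons / max?_id_cons).
def find_pole_edges (groups : List (List (Int × Int))) : List (List (String × Int)) :=
  groups.foldl (fun min_max group =>
    match group with
    | [] => min_max
    | q :: t =>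
      let x_coords : List Int := (q :: t).map (fun point => point.1)
      let y_coords : List Int := (q :: t).map (fun point => point.2)
      let x_min := x_coords.tail.foldl min x_coords.head!
      let x_max := x_coords.tail.foldl max x_coords.head!
      let y_min := y_coords.tail.foldl min y_coords.head!
      let y_max := y_coords.tail.foldl max y_coords.head!
      min_max ++ [[("x_min", x_min), ("x_max", x_max), ("y_min", y_min), ("y_max", y_max)]]) []

-- ===== PORT B =====
-- B: a single pass per group maintaining four bound accumulators.
def find_pole_edges_alt (groups : List (List (Int × Int))) : List (List (String × Int)) :=
  groups.foldl (fun min_max group =>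
    match group with
    | [] => min_max
    | q :: t =>
      let s := t.foldl (fun (s : Int × Int × Int × Int) p =>
        let s1 := if p.1 < s.1 then p.1 else s.1
        let s2 := if p.1 > s.2.1 then p.1 else s.2.1
        let s3 := if p.2 < s.2.2.1 then p.2 else s.2.2.1
        let s4 := if p.2 > s.2.2.2 then p.2 else s.2.2.2
        (s1, s2, s3, s4)) (q.1, q.1, q.2, q.2)
      min_max ++ [[("x_min", s.1), ("x_max", s.2.1), ("y_min", s.2.2.1), ("y_max", s.2.2.2)]]) []

-- ===== PRECONDITION & SPEC =====
def Spec_find_pole_edges (groups : List (List (Int × Int))) (out : List (List (String × Int))) : Prop := out = find_pole_edges_alt groups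
instance (groups : List (List (Int × Int))) (out : List (List (String × Int))) : Decidable (Spec_find_pole_edges groups out) := by unfold Spec_find_pole_edges; infer_instance

-- ===== CLAIM (what is proved, stated in full; the proofs are below) =====
def Claim_equal_find_pole_edges : Prop := ∀ (groups : List (List (Int × Int))), Dom_find_pole_edges groups → Spec_find_pole_edges groups (find_pole_edges groups)

-- ===== LEMMAS AND PROOFS =====

-- ===== VERDICT (by name: the statement is the Claim_ definition above) =====
lemma fpe_quad (t : List (Int × Int)) (a b c d : Int) :
    t.foldl (fun (s : Int × Int × Int × Int) p =>
        let s1 := if p.1 < s.1 then p.1 else s.1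
        let s2 := if p.1 > s.2.1 then p.1 else s.2.1
        let s3 := if p.2 < s.2.2.1 then p.2 else s.2.2.1
        let s4 := if p.2 > s.2.2.2 then p.2 else s.2.2.2
        (s1, s2, s3, s4)) (a, b, c, d)
      = ((t.map (fun p => p.1)).foldl min a, (t.map (fun p => p.1)).foldl max b,
         (t.map (fun p => p.2)).foldl min c, (t.map (fun p => p.2)).foldl max d) := by
  induction t generalizing a b c d with
  | nil => rfl
  | cons p t ih =>
    simp only [List.foldl_cons, List.map_cons, ih]
    have h1 : (if p.1 < a then p.1 else a) = min a p.1 := by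
      simp only [min_def]; split_ifs <;> omega
    have h2 : (if p.1 > b then p.1 else b) = max b p.1 := by
      simp only [max_def]; split_ifs <;> omega
    have h3 : (if p.2 < c then p.2 else c) = min c p.2 := by
      simp only [min_def]; split_ifs <;> omega
    have h4 : (if p.2 > d then p.2 else d) = max d p.2 := by
      simp only [max_def]; split_ifs <;> omega
    simp only [h1, h2, h3, h4]

lemma fpe_group (min_max : List (List (String × Int))) (group : List (Int × Int)) :
    (((fun min_max group =>
      match group with
      | [] => min_max
      | q :: t =>
        let x_coords : List Int := (q :: t).map (fun point => point.1)
        let y_coords : List Int := (q :: t).map (fun point => point.2)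
        let x_min := x_coords.tail.foldl min x_coords.head!
        let x_max := x_coords.tail.foldl max x_coords.head!
        let y_min := y_coords.tail.foldl min y_coords.head!
        let y_max := y_coords.tail.foldl max y_coords.head!
        min_max ++ [[("x_min", x_min), ("x_max", x_max), ("y_min", y_min), ("y_max", y_max)]]) :
      List (List (String × Int)) → List (Int × Int) → List (List (String × Int))))
      min_max group
    = (((fun min_max group =>
      match group with
      | [] => min_max
      | q :: t =>
        let s := t.foldl (fun (s : Int × Int × Int × Int) p =>
          let s1 := if p.1 < s.1 then p.1 else s.1
          let s2 := if p.1 > s.2.1 then p.1 else s.2.1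
          let s3 := if p.2 < s.2.2.1 then p.2 else s.2.2.1
          let s4 := if p.2 > s.2.2.2 then p.2 else s.2.2.2
          (s1, s2, s3, s4)) (q.1, q.1, q.2, q.2)
        min_max ++ [[("x_min", s.1), ("x_max", s.2.1), ("y_min", s.2.2.1), ("y_max", s.2.2.2)]]) :
      List (List (String × Int)) → List (Int × Int) → List (List (String × Int))))
      min_max group := by
  cases group with
  | nil => rfl
  | cons q t => simp [fpe_quad]

theorem find_pole_edges_spec : Claim_equal_find_pole_edges := by
  intro groups _
  unfold Spec_find_pole_edges find_pole_edges find_pole_edges_alt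
  exact congrFun (congrFun (congrArg List.foldl (funext fun m => funext fun g => fpe_group m g)) []) groups
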